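-- pv_equiv track=rewrite | github.com/Patrone411/waymo_scenario_extraction | scenario_extraction/scenario_matching/analysis_stats/stats_windows.py | max_possible_windows
-- ===== SOURCE A (Python) =====
-- def max_possible_windows(T: int, minF: int, maxF: int) -> int:
--     """Number of windows (t0,t1) in a length-T segment with length in [minF..maxF]."""
--     if T <= 0:
--         return 0
--     minF = max(1, int(minF))
--     maxF = max(minF, int(maxF))
--     tot = 0
--     for t0 in range(T):
--         t1_min = t0 + minF - 1
--         t1_max = min(T - 1, t0 + maxF - 1)
--         if t1_min <= t1_max:
--             tot += (t1_max - t1_min + 1)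
--     return int(tot)
-- ===== SOURCE B (Python) =====
-- def max_possible_windows(T: int, minF: int, maxF: int) -> int:
--     """Number of windows (t0,t1) in a length-T segment with length in [minF..maxF].
--     Closed form: sum over feasible lengths L in [m..min(M,T)] of (T-L+1),
--     computed as a difference of two triangular numbers."""
--     if T <= 0:
--         return 0
--     m = max(1, int(minF))
--     M = max(m, int(maxF))
--     hi = min(M, T)
--     if hi < m:
--         return 0
--     a = T + 1 - m
--     b = T - hi
--     return a * (a + 1) // 2 - b * (b + 1) // 2
-- ===== Notes on version B (the rewrite author's own statement) =====
-- stated objective: faster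
-- what changed: Replaced the O(T) loop over window start positions by a closed-form difference of two triangular numbers over feasible window lengths.
import Mathlib
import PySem

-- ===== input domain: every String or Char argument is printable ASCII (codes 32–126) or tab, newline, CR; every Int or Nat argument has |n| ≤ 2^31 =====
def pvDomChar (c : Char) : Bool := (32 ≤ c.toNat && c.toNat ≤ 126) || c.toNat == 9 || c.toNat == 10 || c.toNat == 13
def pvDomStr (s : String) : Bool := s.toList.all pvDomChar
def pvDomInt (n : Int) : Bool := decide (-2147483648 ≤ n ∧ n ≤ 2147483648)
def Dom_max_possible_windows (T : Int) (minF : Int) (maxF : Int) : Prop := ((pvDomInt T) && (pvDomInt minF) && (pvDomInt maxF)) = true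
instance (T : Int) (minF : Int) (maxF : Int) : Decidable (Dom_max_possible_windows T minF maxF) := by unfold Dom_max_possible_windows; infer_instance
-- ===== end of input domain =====

-- B replaces A's loop over start positions by a closed-form difference of triangular numbers (objective: faster).

-- ===== PORT A =====
def max_possible_windows (T : Int) (minF : Int) (maxF : Int) : Int :=
  if T ≤ 0 then 0
  else
    let m := max 1 minF
    let M := max m maxF
    (PySem.List.pyRange 0 T 1).foldl (fun tot t0 =>
      let t1min := t0 + m - 1
      let t1max := min (T - 1) (t0 + M - 1)
      if t1min ≤ t1max then tot + (t1max - t1min + 1) else tot) 0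

-- ===== PORT B =====
def max_possible_windows_alt (T : Int) (minF : Int) (maxF : Int) : Int :=
  if T ≤ 0 then 0
  else
    let m := max 1 minF
    let M := max m maxF
    let hi := min M T
    if hi < m then 0
    else
      let a := T + 1 - m
      let b := T - hi
      PySem.Int.floordiv (a * (a + 1)) 2 - PySem.Int.floordiv (b * (b + 1)) 2

-- ===== PRECONDITION & SPEC =====
def Spec_max_possible_windows (T : Int) (minF : Int) (maxF : Int) (out : Int) : Prop := out = max_possible_windows_alt T minF maxF
instance (T : Int) (minF : Int) (maxF : Int) (out : Int) : Decidable (Spec_max_possible_windows T minF maxF out) := by unfold Spec_max_possible_windows; infer_instance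

-- ===== CLAIM (what is proved, stated in full; the proofs are below) =====
def Claim_equal_max_possible_windows : Prop := ∀ (T : Int) (minF : Int) (maxF : Int), Dom_max_possible_windows T minF maxF → Spec_max_possible_windows T minF maxF (max_possible_windows T minF maxF)

-- ===== LEMMAS AND PROOFS =====

-- triangular number x*(x+1)//2, as B computes it
def triA (x : Int) : Int := PySem.Int.floordiv (x * (x + 1)) 2

theorem triA_two (x : Int) : 2 * triA x = x * (x + 1) := by
  unfold triA
  rw [PySem.Int.floordiv_eq_ediv_of_pos (by norm_num)]
  rcases Int.even_mul_succ_self x with ⟨c, hc⟩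
  rw [hc]
  have h2 : c + c = 2 * c := by ring
  rw [h2, Int.mul_ediv_cancel_left _ (by norm_num)]

theorem triA_succ (a : Int) : triA (a + 1) = triA a + (a + 1) := by
  have h1 : 2 * triA (a + 1) = (a + 1) * (a + 1 + 1) := triA_two (a + 1)
  have h2 : 2 * triA a = a * (a + 1) := triA_two a
  have h3 : 2 * triA (a + 1) - 2 * triA a = 2 * (a + 1) := by linear_combination h1 - h2
  omega

theorem triA_zero : triA 0 = 0 := by
  have := triA_two 0; omega

-- A's loop, rewritten as init + sum of a mapped list
theorem foldl_body_eq (T m M : Int) (l : List Int) (init : Int) :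
    l.foldl (fun tot t0 =>
      let t1min := t0 + m - 1
      let t1max := min (T - 1) (t0 + M - 1)
      if t1min ≤ t1max then tot + (t1max - t1min + 1) else tot) init
    = init + (l.map (fun t0 =>
        if t0 + m - 1 ≤ min (T - 1) (t0 + M - 1)
        then min (T - 1) (t0 + M - 1) - (t0 + m - 1) + 1 else 0)).sum := by
  induction l generalizing init with
  | nil => simp
  | cons x xs ih =>
      simp only [List.foldl_cons, List.map_cons, List.sum_cons, ih]
      split_ifs <;> ring

theorem list_range_sum (f : Nat → Int) (n : Nat) :
    ((List.range n).map f).sum = ∑ i ∈ Finset.range n, f i := by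
  induction n with
  | zero => simp
  | succ k ih => simp [List.range_succ, Finset.sum_range_succ, ih]

-- per-length term (i+1 = window length candidate): number of starts for that length
def hterm (m M : Int) (i : Nat) : Int :=
  if m ≤ min ((i : Int) + 1) M then min ((i : Int) + 1) M - m + 1 else 0

def closedC (T m M : Int) : Int :=
  if min M T < m then 0 else triA (T + 1 - m) - triA (T - min M T)

theorem sum_hterm (m M : Int) (hm : 1 ≤ m) (hM : m ≤ M) (n : Nat) :
    ∑ i ∈ Finset.range n, hterm m M i = closedC (n : Int) m M := by
  induction n with
  | zero =>
      simp only [Finset.range_zero, Finset.sum_empty, closedC]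
      rw [if_pos (by omega)]
  | succ k ih =>
      rw [Finset.sum_range_succ, ih]
      have hcast : ((k + 1 : Nat) : Int) = (k : Int) + 1 := by push_cast; ring
      rw [hcast]
      unfold closedC hterm
      rcases lt_or_ge ((k : Int) + 1) m with h1 | h1
      · have z1 := min_le_right M ((k : Int))
        have z2 := min_le_right M ((k : Int) + 1)
        have z3 := min_le_left ((k : Int) + 1) M
        split_ifs <;> omega
      · rcases lt_or_ge M ((k : Int) + 1) with h2 | h2
        · -- M ≤ k : both mins are M, m ≤ M ≤ k
          have e1 : min M ((k : Int) + 1) = M := min_eq_left (by omega)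
          have e2 : min ((k : Int) + 1) M = M := min_eq_right (by omega)
          have e3 : min M ((k : Int)) = M := min_eq_left (by omega)
          rw [e1, e2, e3]
          have t1 : triA ((k : Int) + 1 + 1 - m) = triA ((k : Int) + 1 - m) + ((k : Int) + 1 - m + 1) := by
            rw [show (k : Int) + 1 + 1 - m = ((k : Int) + 1 - m) + 1 by ring, triA_succ]
          have t2 : triA ((k : Int) + 1 - M) = triA ((k : Int) - M) + ((k : Int) - M + 1) := by
            rw [show (k : Int) + 1 - M = ((k : Int) - M) + 1 by ring, triA_succ]
          split_ifs <;> omega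
        · -- m ≤ k+1 ≤ M
          have e1 : min M ((k : Int) + 1) = (k : Int) + 1 := min_eq_right (by omega)
          have e2 : min ((k : Int) + 1) M = (k : Int) + 1 := min_eq_left (by omega)
          rw [e1, e2]
          have t1 : triA ((k : Int) + 1 + 1 - m) = triA ((k : Int) + 1 - m) + ((k : Int) + 1 - m + 1) := by
            rw [show (k : Int) + 1 + 1 - m = ((k : Int) + 1 - m) + 1 by ring, triA_succ]
          have tz : triA ((k : Int) + 1 - ((k : Int) + 1)) = 0 := by
            rw [show (k : Int) + 1 - ((k : Int) + 1) = (0 : Int) by ring]; exact triA_zero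
          rcases lt_or_ge ((k : Int)) m with h3 | h3
          · -- m = k+1
            have tz3 : triA ((k : Int) + 1 - m) = 0 := by
              rw [show (k : Int) + 1 - m = (0 : Int) by omega]; exact triA_zero
            have zb := min_le_right M ((k : Int))
            split_ifs <;> omega
          · have e3 : min M ((k : Int)) = (k : Int) := min_eq_right (by omega)
            rw [e3]
            have tz2 : triA ((k : Int) - (k : Int)) = 0 := by
              rw [show (k : Int) - (k : Int) = (0 : Int) by ring]; exact triA_zero
            split_ifs <;> omega

theorem loopA_eq (T m M : Int) (hT : 0 < T) (hm : 1 ≤ m) (hM : m ≤ M) :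
    (PySem.List.pyRange 0 T 1).foldl (fun tot t0 =>
      let t1min := t0 + m - 1
      let t1max := min (T - 1) (t0 + M - 1)
      if t1min ≤ t1max then tot + (t1max - t1min + 1) else tot) 0 = closedC T m M := by
  rw [PySem.List.pyRange_one, foldl_body_eq, List.map_map, list_range_sum]
  simp only [zero_add, sub_zero, Function.comp]
  have hTn : ((T.toNat : Nat) : Int) = T := by omega
  refine Eq.trans (Finset.sum_congr rfl fun j hj => ?_)
    (Eq.trans (Finset.sum_range_reflect (hterm m M) T.toNat) ?_)
  · have hj' : j < T.toNat := Finset.mem_range.mp hj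
    simp only [hterm]
    have hc : ((T.toNat - 1 - j : Nat) : Int) = T - 1 - (j : Int) := by omega
    rw [hc]
    split_ifs <;> omega
  · rw [sum_hterm m M hm hM, hTn]

-- ===== VERDICT (by name: the statement is the Claim_ definition above) =====
theorem max_possible_windows_spec : Claim_equal_max_possible_windows := by
  intro T minF maxF _
  unfold Spec_max_possible_windows
  by_cases hT : T ≤ 0
  · simp only [max_possible_windows, max_possible_windows_alt, if_pos hT]
  · have h1 : (1 : Int) ≤ max 1 minF := le_max_left _ _
    have h2 : max 1 minF ≤ max (max 1 minF) maxF := le_max_left _ _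
    simp only [max_possible_windows, max_possible_windows_alt, if_neg hT]
    rw [loopA_eq T (max 1 minF) (max (max 1 minF) maxF) (by omega) h1 h2]
    unfold closedC triA
    rfl
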